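-- pv_equiv track=rewrite | github.com/DRMF/DRMF-Seeding-Project | Azeem/tex2Wiki.py | getG
-- ===== SOURCE A (Python) =====
-- def getG(line):  # gets equation for symbols list
--     start = True
--     final = ""
--     for c in line:
--         if c == "$" and start:
--             final += "<math>{\\displaystyle "
--             start = False
--         elif c == "$":
--             final += "}</math>"
--             start = True
--         else:
--             final += c
--     return (final)
-- ===== SOURCE B (Python) =====
-- def getG(line):  # gets equation for symbols list
--     parts = line.split("$")
--     out = parts[0]
--     opening = True
--     for p in parts[1:]:
--         out += "<math>{\\displaystyle " if opening else "}</math>"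
--         out += p
--         opening = not opening
--     return out
-- ===== Notes on version B (the rewrite author's own statement) =====
-- stated objective: faster
-- what changed: Replaced the per-character state-toggle scan that grows the output one character at a time with a split on the dollar delimiter followed by rejoining whole segments with alternating opening/closing tags.
import Mathlib
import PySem

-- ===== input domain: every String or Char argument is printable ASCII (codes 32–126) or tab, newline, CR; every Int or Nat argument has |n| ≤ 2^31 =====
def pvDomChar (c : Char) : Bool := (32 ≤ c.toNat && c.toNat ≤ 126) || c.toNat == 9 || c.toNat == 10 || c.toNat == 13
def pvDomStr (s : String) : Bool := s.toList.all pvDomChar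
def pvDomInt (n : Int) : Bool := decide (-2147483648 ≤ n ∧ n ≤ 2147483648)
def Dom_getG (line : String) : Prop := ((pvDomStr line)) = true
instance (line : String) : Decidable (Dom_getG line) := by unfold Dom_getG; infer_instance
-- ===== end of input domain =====

-- B replaces A's per-character open/close toggle scan by splitting on the dollar delimiter
-- and rejoining whole segments with alternating tags (measured faster by bulk copies).

-- ===== PORT A =====
-- A: scan the characters, toggling `start`, appending the opening or closing tag at each '$'.
-- (strings are built as List Char and packed with String.ofList at the end; same values appended)
def getG_stepA (st : Bool × List Char) (c : Char) : Bool × List Char :=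
  if c = '$' ∧ st.1 then (false, st.2 ++ "<math>{\\displaystyle ".toList)
  else if c = '$' then (true, st.2 ++ "}</math>".toList)
  else (st.1, st.2 ++ [c])

def getG (line : String) : String :=
  String.ofList (line.toList.foldl getG_stepA (true, [])).2

-- ===== PORT B =====
-- B: parts = line.split on the dollar char (hand-ported, exact for this one-char separator),
-- then rejoin: first part, then before each later part an alternating tag.
def getG_splitD : List Char → List (List Char)
  | [] => [[]]
  | c :: cs =>
    if c = '$' then [] :: getG_splitD cs
    else
      match getG_splitD cs with
      | p :: ps => (c :: p) :: ps
      | [] => [[c]]   -- unreachable: getG_splitD never returns []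

def getG_stepB (st : List Char × Bool) (q : List Char) : List Char × Bool :=
  (st.1 ++ (if st.2 then "<math>{\\displaystyle ".toList else "}</math>".toList) ++ q, !st.2)

def getG_alt (line : String) : String :=
  match getG_splitD line.toList with
  | [] => ""   -- unreachable
  | p :: rest => String.ofList (rest.foldl getG_stepB (p, true)).1

-- ===== PRECONDITION & SPEC =====
def Spec_getG (line : String) (out : String) : Prop := out = getG_alt line
instance (line : String) (out : String) : Decidable (Spec_getG line out) := by unfold Spec_getG; infer_instance

-- ===== CLAIM (what is proved, stated in full; the proofs are below) =====
def Claim_equal_getG : Prop := ∀ (line : String), Dom_getG line → Spec_getG line (getG line)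

-- ===== LEMMAS AND PROOFS =====

-- the common direct recursion both sides are reduced to
def getG_core (b : Bool) : List Char → List Char
  | [] => []
  | c :: cs =>
    if c = '$' then
      (if b then "<math>{\\displaystyle ".toList else "}</math>".toList) ++ getG_core (!b) cs
    else c :: getG_core b cs

-- A's fold equals the accumulator followed by the direct recursion
theorem getG_foldA (cs : List Char) (b : Bool) (acc : List Char) :
    (cs.foldl getG_stepA (b, acc)).2 = acc ++ getG_core b cs := by
  induction cs generalizing b acc with
  | nil => simp [getG_core]
  | cons c cs ih =>
    by_cases hc : c = '$' <;> cases b <;>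
      simp [getG_stepA, getG_core, hc, ih, List.append_assoc]

def getG_joinAlt (b : Bool) : List (List Char) → List Char
  | [] => []
  | q :: qs =>
    (if b then "<math>{\\displaystyle ".toList else "}</math>".toList) ++ q ++ getG_joinAlt (!b) qs

-- B's fold equals the first part followed by the alternating join
theorem getG_foldB (qs : List (List Char)) (b : Bool) (p : List Char) :
    (qs.foldl getG_stepB (p, b)).1 = p ++ getG_joinAlt b qs := by
  induction qs generalizing b p with
  | nil => simp [getG_joinAlt]
  | cons q qs ih =>
    simp [getG_stepB, getG_joinAlt, ih, List.append_assoc]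

theorem getG_splitD_ne_nil (cs : List Char) : getG_splitD cs ≠ [] := by
  cases cs with
  | nil => simp [getG_splitD]
  | cons c cs =>
    by_cases hc : c = '$'
    · simp [getG_splitD, hc]
    · simp only [getG_splitD, hc, if_false]
      cases getG_splitD cs <;> simp

-- split-then-join reproduces the direct recursion
theorem getG_split_join (cs : List Char) (b : Bool) :
    (getG_splitD cs).headD [] ++ getG_joinAlt b (getG_splitD cs).tail = getG_core b cs := by
  induction cs generalizing b with
  | nil => simp [getG_splitD, getG_joinAlt, getG_core]
  | cons c cs ih =>
    by_cases hc : c = '$'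
    · simp only [getG_splitD, hc, List.headD, List.tail, getG_core, if_true]
      cases h : getG_splitD cs with
      | nil => exact absurd h (getG_splitD_ne_nil cs)
      | cons p ps =>
        have := ih (!b)
        rw [h] at this
        simp only [List.headD, List.tail] at this
        simp [getG_joinAlt, ← this, List.append_assoc]
    · simp only [getG_splitD, hc, if_false, getG_core]
      cases h : getG_splitD cs with
      | nil => exact absurd h (getG_splitD_ne_nil cs)
      | cons p ps =>
        have := ih b
        rw [h] at this
        simp only [List.headD, List.tail] at this
        simp [← this]

-- ===== VERDICT (by name: the statement is the Claim_ definition above) =====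
theorem getG_spec : Claim_equal_getG := by
  intro line _
  unfold Spec_getG getG getG_alt
  cases h : getG_splitD line.toList with
  | nil => exact absurd h (getG_splitD_ne_nil line.toList)
  | cons p ps =>
    have hsj := getG_split_join line.toList true
    rw [h] at hsj
    simp only [List.headD, List.tail] at hsj
    rw [getG_foldA]
    simp only [List.nil_append]
    rw [getG_foldB, hsj]
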